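-- pv_equiv track=rewrite | github.com/izaxs/algo | pycode/10/1020.py | numEnclaves2
-- ===== SOURCE A (Python) =====
-- def numEnclaves2(grid: list[list[int]]) -> int:
--     DIRS = ((1, 0), (-1, 0), (0, 1), (0, -1))
--     def dfsCancel(x: int, y: int):
--         if not (0 <= x < len(grid) and 0 <= y < len(grid[0])) or not grid[x][y]: return
--         grid[x][y] = 0
--         for dx, dy in DIRS:
--             dfsCancel(x+dx, y+dy)
--     if len(grid) <= 2 or len(grid[0]) <= 2: return 0
--     for i in range(len(grid)):
--         dfsCancel(i, 0)
--         dfsCancel(i, len(grid[0])-1)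
--     for i in range(len(grid[0])):
--         dfsCancel(0, i)
--         dfsCancel(len(grid)-1, i)
--     return sum(sum(i) for i in grid)
-- ===== SOURCE B (Python) =====
-- def numEnclaves2(grid: list[list[int]]) -> int:
--     if len(grid) <= 2 or len(grid[0]) <= 2:
--         return 0
--     m, n = len(grid), len(grid[0])
--     stack = []
--     for i in range(m):
--         stack.append((i, 0))
--         stack.append((i, n - 1))
--     for j in range(n):
--         stack.append((0, j))
--         stack.append((m - 1, j))
--     stack.reverse()
--     while stack:
--         x, y = stack.pop()
--         if 0 <= x < m and 0 <= y < n and grid[x][y]: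
--             grid[x][y] = 0
--             stack.append((x, y - 1))
--             stack.append((x, y + 1))
--             stack.append((x - 1, y))
--             stack.append((x + 1, y))
--     return sum(sum(row) for row in grid)
-- ===== Notes on version B (the rewrite author's own statement) =====
-- stated objective: alternative
-- what changed: Replaces A's recursive border DFS (nested dfsCancel calls per border cell) with a single explicit stack worklist seeded with all border cells, popped iteratively; same in-place zeroing and final sum.
import Mathlib
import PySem

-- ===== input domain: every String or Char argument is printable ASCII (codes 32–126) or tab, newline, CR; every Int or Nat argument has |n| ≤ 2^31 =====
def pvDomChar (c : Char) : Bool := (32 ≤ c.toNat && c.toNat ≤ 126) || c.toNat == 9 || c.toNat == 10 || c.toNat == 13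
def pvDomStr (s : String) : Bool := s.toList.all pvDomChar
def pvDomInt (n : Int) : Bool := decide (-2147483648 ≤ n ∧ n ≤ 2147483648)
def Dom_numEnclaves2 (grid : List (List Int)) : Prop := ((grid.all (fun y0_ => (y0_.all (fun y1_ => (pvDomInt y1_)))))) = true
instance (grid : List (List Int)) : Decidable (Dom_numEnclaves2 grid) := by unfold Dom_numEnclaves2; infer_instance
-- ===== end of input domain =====

-- B replaces A's recursive DFS by an explicit stack worklist (same zeroing, no recursion);
-- both A and B mutate `grid` in place in Python — the equivalence proved here is about the return value.

-- shared primitives for reading/writing one cell of the grid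
def pvCell (g : List (List Int)) (x y : Int) : Int := (g.getD x.toNat []).getD y.toNat 0

def pvZero (g : List (List Int)) (x y : Int) : List (List Int) :=
  g.set x.toNat ((g.getD x.toNat []).set y.toNat 0)

-- Python's test `0 <= x < m and 0 <= y < n and grid[x][y]` (truthiness of an int = ≠ 0)
def pvHit (m n : Int) (g : List (List Int)) (x y : Int) : Bool :=
  decide (0 ≤ x) && decide (x < m) && decide (0 ≤ y) && decide (y < n) && (pvCell g x y != 0)

-- number of nonzero cells; the termination measure of both flood fills
def pvOnes (g : List (List Int)) : Nat :=
  (g.map (fun r => r.countP (fun v => decide (v ≠ 0)))).sum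

lemma pvHit_cell {m n : Int} {g : List (List Int)} {x y : Int} (h : pvHit m n g x y = true) :
    pvCell g x y ≠ 0 := by
  intro hc
  rw [pvHit, hc] at h
  simp at h

lemma countP_set_zero (r : List Int) (j : Nat) (h : r.getD j 0 ≠ 0) :
    (r.set j 0).countP (fun v => decide (v ≠ 0)) < r.countP (fun v => decide (v ≠ 0)) := by
  induction r generalizing j with
  | nil => simp [List.getD] at h
  | cons a t ih =>
    cases j with
    | zero =>
      have ha : a ≠ 0 := by simpa [List.getD] using h
      simp only [List.set_cons_zero, List.countP_cons]
      simp [ha]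
    | succ j =>
      rw [List.getD_cons_succ] at h
      have := ih j h
      simp only [List.set_cons_succ, List.countP_cons]
      omega

lemma pvOnes_set_lt (g : List (List Int)) (i : Nat) (r : List Int)
    (h : r.countP (fun v => decide (v ≠ 0)) < (g.getD i []).countP (fun v => decide (v ≠ 0))) :
    pvOnes (g.set i r) < pvOnes g := by
  induction g generalizing i with
  | nil => simp [List.getD] at h
  | cons a t ih =>
    cases i with
    | zero =>
      rw [List.getD_cons_zero] at h
      simp only [List.set_cons_zero, pvOnes, List.map_cons, List.sum_cons]
      omega
    | succ i =>
      rw [List.getD_cons_succ] at h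
      have := ih i h
      simp only [List.set_cons_succ, pvOnes, List.map_cons, List.sum_cons] at *
      omega

lemma pvOnes_zero_lt (g : List (List Int)) (x y : Int) (h : pvCell g x y ≠ 0) :
    pvOnes (pvZero g x y) < pvOnes g := by
  apply pvOnes_set_lt
  exact countP_set_zero _ _ h

-- ===== PORT A =====
-- `dfsCancel`: the subtype result carries the termination invariant (pvOnes never grows)
def pvDfs (g : List (List Int)) (x y : Int) : {g' : List (List Int) // pvOnes g' ≤ pvOnes g} :=
  if h : pvHit (g.length : Int) (((g.headD []).length : Int)) g x y = true then
    have h1 : pvOnes (pvZero g x y) < pvOnes g := pvOnes_zero_lt g x y (pvHit_cell h)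
    let r1 := pvDfs (pvZero g x y) (x+1) y
    have e1 : pvOnes r1.1 < pvOnes g := lt_of_le_of_lt r1.2 h1
    let r2 := pvDfs r1.1 (x-1) y
    have e2 : pvOnes r2.1 < pvOnes g := lt_of_le_of_lt r2.2 e1
    let r3 := pvDfs r2.1 x (y+1)
    have e3 : pvOnes r3.1 < pvOnes g := lt_of_le_of_lt r3.2 e2
    let r4 := pvDfs r3.1 x (y-1)
    ⟨r4.1, le_of_lt (lt_of_le_of_lt r4.2 e3)⟩
  else ⟨g, le_refl _⟩
termination_by pvOnes g
decreasing_by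
  · exact h1
  · exact e1
  · exact e2
  · exact e3

def numEnclaves2 (grid : List (List Int)) : Int :=
  if grid.length ≤ 2 then 0
  else if (grid.headD []).length ≤ 2 then 0
  else
    let g1 := (List.range grid.length).foldl
      (fun (g : List (List Int)) (i : Nat) =>
        (pvDfs (pvDfs g (i : Int) 0).1 (i : Int)
          ((((pvDfs g (i : Int) 0).1.headD []).length : Int) - 1)).1) grid
    let g2 := (List.range (g1.headD []).length).foldl
      (fun (g : List (List Int)) (j : Nat) =>
        (pvDfs (pvDfs g 0 (j : Int)).1
          ((((pvDfs g 0 (j : Int)).1.length : Int) - 1)) (j : Int)).1) g1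
    (g2.map (fun r => r.sum)).sum

-- ===== PORT B =====
-- the worklist loop (head of `ws` = top of Python's stack)
def floodLoop (m n : Int) (g : List (List Int)) (ws : List (Int × Int)) : List (List Int) :=
  match ws with
  | [] => g
  | (x, y) :: rest =>
    if h : pvHit m n g x y = true then
      floodLoop m n (pvZero g x y) ((x+1, y) :: (x-1, y) :: (x, y+1) :: (x, y-1) :: rest)
    else
      floodLoop m n g rest
termination_by (pvOnes g, ws.length)
decreasing_by
  · exact Prod.Lex.left _ _ (pvOnes_zero_lt g x y (pvHit_cell h))
  · exact Prod.Lex.right _ (Nat.lt_succ_self _)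

def numEnclaves2_alt (grid : List (List Int)) : Int :=
  if grid.length ≤ 2 then 0
  else if (grid.headD []).length ≤ 2 then 0
  else
    let m : Int := grid.length
    let n : Int := (grid.headD []).length
    let seeds :=
      ((List.range grid.length).flatMap (fun (i : Nat) => [((i : Int), (0 : Int)), ((i : Int), n - 1)])) ++
      ((List.range (grid.headD []).length).flatMap (fun (j : Nat) => [((0 : Int), (j : Int)), (m - 1, (j : Int))]))
    let g' := floodLoop m n grid seeds
    (g'.map (fun r => r.sum)).sum

-- ===== PRECONDITION & SPEC =====
-- Pre_ excludes exactly the grids on which Python A raises IndexError: a grid with at least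
-- 3 rows whose first row has at least 3 cells but some row shorter than the first row.
def Pre_numEnclaves2 (grid : List (List Int)) : Prop :=
  grid.length ≤ 2 ∨ (grid.headD []).length ≤ 2 ∨ ∀ r ∈ grid, (grid.headD []).length ≤ r.length
instance (grid : List (List Int)) : Decidable (Pre_numEnclaves2 grid) := by
  unfold Pre_numEnclaves2; infer_instance

def pvWitness_numEnclaves2 : List (List Int) := [[0, 0, 0], [0, 1, 0], [0, 0, 0]]

def Spec_numEnclaves2 (grid : List (List Int)) (out : Int) : Prop := out = numEnclaves2_alt grid
instance (grid : List (List Int)) (out : Int) : Decidable (Spec_numEnclaves2 grid out) := by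
  unfold Spec_numEnclaves2; infer_instance

-- ===== CLAIM (what is proved, stated in full; the proofs are below) =====
def Claim_equal_numEnclaves2 : Prop := ∀ (grid : List (List Int)), Dom_numEnclaves2 grid → Pre_numEnclaves2 grid → Spec_numEnclaves2 grid (numEnclaves2 grid)

-- ===== LEMMAS AND PROOFS =====

lemma length_pvZero (g : List (List Int)) (x y : Int) : (pvZero g x y).length = g.length := by
  simp [pvZero]

lemma headD_len_pvZero (g : List (List Int)) (x y : Int) :
    ((pvZero g x y).headD []).length = (g.headD []).length := by
  cases g with
  | nil => simp [pvZero]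
  | cons a t =>
    cases hx : x.toNat with
    | zero => simp [pvZero, hx, List.getD]
    | succ k => simp [pvZero, hx]

lemma pvDfs_shape (k : Nat) (g : List (List Int)) (x y : Int) (hg : pvOnes g ≤ k) :
    (pvDfs g x y).1.length = g.length ∧
      ((pvDfs g x y).1.headD []).length = (g.headD []).length := by
  induction k generalizing g x y with
  | zero =>
    rw [pvDfs]
    by_cases h : pvHit (g.length : Int) (((g.headD []).length : Int)) g x y = true
    · exact absurd (pvOnes_zero_lt g x y (pvHit_cell h)) (by omega)
    · rw [dif_neg h]
      exact ⟨rfl, rfl⟩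
  | succ k ih =>
    rw [pvDfs]
    by_cases h : pvHit (g.length : Int) (((g.headD []).length : Int)) g x y = true
    · rw [dif_pos h]
      have hz := pvOnes_zero_lt g x y (pvHit_cell h)
      have b1 := (pvDfs (pvZero g x y) (x+1) y).2
      have b2 := (pvDfs (pvDfs (pvZero g x y) (x+1) y).1 (x-1) y).2
      have b3 := (pvDfs (pvDfs (pvDfs (pvZero g x y) (x+1) y).1 (x-1) y).1 x (y+1)).2
      have s1 := ih (pvZero g x y) (x+1) y (by omega)
      have s2 := ih (pvDfs (pvZero g x y) (x+1) y).1 (x-1) y (by omega)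
      have s3 := ih (pvDfs (pvDfs (pvZero g x y) (x+1) y).1 (x-1) y).1 x (y+1) (by omega)
      have s4 := ih (pvDfs (pvDfs (pvDfs (pvZero g x y) (x+1) y).1 (x-1) y).1 x (y+1)).1 x (y-1)
        (by omega)
      refine ⟨?_, ?_⟩
      · rw [s4.1, s3.1, s2.1, s1.1, length_pvZero]
      · rw [s4.2, s3.2, s2.2, s1.2, headD_len_pvZero]
    · rw [dif_neg h]
      exact ⟨rfl, rfl⟩

lemma pvDfs_length (g : List (List Int)) (x y : Int) : (pvDfs g x y).1.length = g.length :=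
  (pvDfs_shape (pvOnes g) g x y le_rfl).1

lemma pvDfs_headD_len (g : List (List Int)) (x y : Int) :
    ((pvDfs g x y).1.headD []).length = (g.headD []).length :=
  (pvDfs_shape (pvOnes g) g x y le_rfl).2

-- the stack loop is the fold of the recursive DFS over the worklist
lemma floodLoop_foldl_aux (k : Nat) (m n : Int) (g : List (List Int)) (ws : List (Int × Int))
    (hk : 5 * pvOnes g + ws.length ≤ k)
    (hm : (g.length : Int) = m) (hn : ((g.headD []).length : Int) = n) :
    floodLoop m n g ws = ws.foldl (fun g p => (pvDfs g p.1 p.2).1) g := by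
  induction k generalizing g ws with
  | zero =>
    cases ws with
    | nil => rw [floodLoop]; rfl
    | cons p rest => simp [List.length_cons] at hk
  | succ k ih =>
    cases ws with
    | nil => rw [floodLoop]; rfl
    | cons p rest =>
      obtain ⟨x, y⟩ := p
      rw [floodLoop]
      by_cases h : pvHit m n g x y = true
      · rw [dif_pos h]
        have hz := pvOnes_zero_lt g x y (pvHit_cell h)
        rw [ih (pvZero g x y) _ (by simp at hk ⊢; omega)
            (by rw [length_pvZero]; exact hm) (by rw [headD_len_pvZero]; exact hn)]
        simp only [List.foldl_cons]
        congr 1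
        conv_rhs => rw [pvDfs, dif_pos (by rw [hm, hn]; exact h)]
      · rw [dif_neg h]
        rw [ih g rest (by simp at hk ⊢; omega) hm hn]
        simp only [List.foldl_cons]
        congr 1
        conv_rhs => rw [pvDfs, dif_neg (by rw [hm, hn]; exact h)]

lemma floodLoop_foldl (m n : Int) (g : List (List Int)) (ws : List (Int × Int))
    (hm : (g.length : Int) = m) (hn : ((g.headD []).length : Int) = n) :
    floodLoop m n g ws = ws.foldl (fun g p => (pvDfs g p.1 p.2).1) g :=
  floodLoop_foldl_aux (5 * pvOnes g + ws.length) m n g ws le_rfl hm hn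

lemma foldl_flatMap2 {γ : Type} (l : List γ) (a b : γ → Int × Int)
    (f : List (List Int) → Int × Int → List (List Int)) (init : List (List Int)) :
    (l.flatMap (fun i => [a i, b i])).foldl f init
      = l.foldl (fun g i => f (f g (a i)) (b i)) init := by
  induction l generalizing init with
  | nil => rfl
  | cons c t ih => simp [List.flatMap_cons, ih]

lemma foldl_inv_congr {α β : Type} (P : β → Prop) (f h : β → α → β) (l : List α) (init : β)
    (hinit : P init) (pres : ∀ b a, P b → P (f b a)) (agree : ∀ b a, P b → f b a = h b a) :
    l.foldl f init = l.foldl h init := by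
  induction l generalizing init with
  | nil => rfl
  | cons c t ih =>
    simp only [List.foldl_cons]
    rw [← agree init c hinit]
    exact ih (f init c) (pres init c hinit)

lemma foldl_pres {α β : Type} (P : β → Prop) (f : β → α → β) (l : List α) (init : β)
    (hinit : P init) (pres : ∀ b a, P b → P (f b a)) : P (l.foldl f init) := by
  induction l generalizing init with
  | nil => exact hinit
  | cons c t ih => exact ih (f init c) (pres init c hinit)

-- ===== VERDICT (by name: the statement is the Claim_ definition above) =====
theorem numEnclaves2_spec : Claim_equal_numEnclaves2 := by
  intro grid _ _
  unfold Spec_numEnclaves2 numEnclaves2 numEnclaves2_alt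
  by_cases h1 : grid.length ≤ 2
  · simp only [if_pos h1]
  · simp only [if_neg h1]
    by_cases h2 : (grid.headD []).length ≤ 2
    · simp only [if_pos h2]
    · simp only [if_neg h2]
      set m : Int := (grid.length : Int) with hm
      set n : Int := ((grid.headD []).length : Int) with hn
      set P : List (List Int) → Prop :=
        fun g => (g.length : Int) = m ∧ ((g.headD []).length : Int) = n with hP
      have hpres : ∀ g x y, P g → P (pvDfs g x y).1 := by
        intro g x y hg
        exact ⟨by rw [pvDfs_length]; exact hg.1, by rw [pvDfs_headD_len]; exact hg.2⟩
      have hPgrid : P grid := ⟨rfl, rfl⟩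
      rw [floodLoop_foldl m n grid _ rfl rfl, List.foldl_append,
          foldl_flatMap2, foldl_flatMap2]
      dsimp only
      have sweep1 :
          (List.range grid.length).foldl
            (fun (g : List (List Int)) (i : Nat) =>
              (pvDfs (pvDfs g (i : Int) 0).1 (i : Int)
                ((((pvDfs g (i : Int) 0).1.headD []).length : Int) - 1)).1) grid
          = (List.range grid.length).foldl
            (fun (g : List (List Int)) (i : Nat) => (pvDfs (pvDfs g (i : Int) 0).1 (i : Int) (n - 1)).1) grid := by
        apply foldl_inv_congr P _ _ _ _ hPgrid
        · intro b a hb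
          exact hpres _ _ _ (hpres _ _ _ hb)
        · intro b a hb
          rw [(hpres b (a : Int) 0 hb).2]
      have inv1 : P ((List.range grid.length).foldl
            (fun (g : List (List Int)) (i : Nat) => (pvDfs (pvDfs g (i : Int) 0).1 (i : Int) (n - 1)).1) grid) := by
        apply foldl_pres P _ _ _ hPgrid
        intro b a hb
        exact hpres _ _ _ (hpres _ _ _ hb)
      rw [sweep1]
      have hlen : ((((List.range grid.length).foldl
          (fun (g : List (List Int)) (i : Nat) => (pvDfs (pvDfs g (i : Int) 0).1 (i : Int) (n - 1)).1) grid)).headD []).length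
          = (grid.headD []).length := by
        have h := inv1.2
        rw [hn] at h
        exact_mod_cast h
      rw [hlen]
      have sweep2 :
          (List.range (grid.headD []).length).foldl
            (fun (g : List (List Int)) (j : Nat) =>
              (pvDfs (pvDfs g 0 (j : Int)).1
                ((((pvDfs g 0 (j : Int)).1.length : Int) - 1)) (j : Int)).1)
            ((List.range grid.length).foldl
              (fun (g : List (List Int)) (i : Nat) => (pvDfs (pvDfs g (i : Int) 0).1 (i : Int) (n - 1)).1) grid)
          = (List.range (grid.headD []).length).foldl
            (fun (g : List (List Int)) (j : Nat) => (pvDfs (pvDfs g 0 (j : Int)).1 (m - 1) (j : Int)).1)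
            ((List.range grid.length).foldl
              (fun (g : List (List Int)) (i : Nat) => (pvDfs (pvDfs g (i : Int) 0).1 (i : Int) (n - 1)).1) grid) := by
        apply foldl_inv_congr P _ _ _ _ inv1
        · intro b a hb
          exact hpres _ _ _ (hpres _ _ _ hb)
        · intro b a hb
          rw [(hpres b 0 (a : Int) hb).1]
      rw [sweep2]
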